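-- pv_equiv track=rewrite | github.com/saransh2405/Adaptive-boosting | ML project 2/adaboosting.py | errorcalculate
-- ===== SOURCE A (Python) =====
-- def errorcalculate(booster,values):
-- 	indx = 0
-- 	cplus = 0
-- 	cneg = 0
-- 	errs = 0
-- 	for val in values:
-- 		cplus = 0
-- 		cneg = 0
-- 		for each in booster:
--
-- 			if each[2] == 1 and int(each[1])>=indx:
-- 				cplus += each[0]
-- 			elif each[2] == -1 and int(each[1])>=indx:
-- 				cneg += each[0]
-- 			elif each[2] == -1 and int(each[1])<indx:
-- 				cplus += each[0]
-- 			else: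
-- 				cneg += each[0]
-- 		indx +=1
--
-- 		if cplus > cneg:
-- 			if int(val) == -1:
-- 				errs +=1
-- 		else:
-- 			if int(val) == 1:
-- 				errs +=1
--
-- 	return errs
-- ===== SOURCE B (Python) =====
-- def errorcalculate(booster, values):
--     # Precompute the initial vote margin d0 = cplus - cneg at index 0, and for each
--     # threshold the margin change that happens when the index passes it; then one
--     # incremental pass over values.
--     d0 = 0
--     delta = {}
--     for (w, thr, s) in booster:
--         if s == 1:
--             if thr >= 0:
--                 d0 += w
--                 delta[thr + 1] = delta.get(thr + 1, 0) - 2 * w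
--             else:
--                 d0 -= w
--         elif s == -1:
--             if thr >= 0:
--                 d0 -= w
--                 delta[thr + 1] = delta.get(thr + 1, 0) + 2 * w
--             else:
--                 d0 += w
--         else:
--             d0 -= w
--     errs = 0
--     d = d0
--     for i, val in enumerate(values):
--         d += delta.get(i, 0)
--         if d > 0:
--             if val == -1:
--                 errs += 1
--         else:
--             if val == 1:
--                 errs += 1
--     return errs
-- ===== Notes on version B (the rewrite author's own statement) =====
-- stated objective: faster
-- what changed: Instead of rescanning the whole booster for every value index, B computes the initial vote margin once and a per-threshold delta table, then updates the margin incrementally in a single pass over values.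
import Mathlib
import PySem

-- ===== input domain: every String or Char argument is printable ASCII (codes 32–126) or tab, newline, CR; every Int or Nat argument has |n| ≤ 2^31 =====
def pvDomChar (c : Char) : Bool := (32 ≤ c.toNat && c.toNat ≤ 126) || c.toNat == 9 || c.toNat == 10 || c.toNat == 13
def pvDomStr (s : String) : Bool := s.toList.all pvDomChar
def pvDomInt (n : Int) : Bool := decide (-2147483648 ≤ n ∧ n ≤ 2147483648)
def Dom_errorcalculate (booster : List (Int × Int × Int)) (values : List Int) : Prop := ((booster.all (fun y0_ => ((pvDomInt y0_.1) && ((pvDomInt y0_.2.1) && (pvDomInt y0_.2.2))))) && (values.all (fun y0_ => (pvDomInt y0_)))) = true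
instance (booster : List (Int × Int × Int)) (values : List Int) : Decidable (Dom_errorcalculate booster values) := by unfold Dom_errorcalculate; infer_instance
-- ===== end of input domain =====

-- B replaces A's rescan of the whole booster at every value index by a precomputed
-- initial margin plus a per-threshold delta table, updated incrementally (objective: faster).

-- ===== PORT A =====
-- inner loop body of A: one booster entry updates (cplus, cneg) at index indx
def pvInnerA (indx : Int) (c : Int × Int) (each : Int × Int × Int) : Int × Int :=
  if each.2.2 = 1 ∧ each.2.1 ≥ indx then (c.1 + each.1, c.2)
  else if each.2.2 = -1 ∧ each.2.1 ≥ indx then (c.1, c.2 + each.1)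
  else if each.2.2 = -1 ∧ each.2.1 < indx then (c.1 + each.1, c.2)
  else (c.1, c.2 + each.1)

-- outer loop body of A: state is (indx, errs)
def pvStepA (booster : List (Int × Int × Int)) (st : Int × Int) (val : Int) : Int × Int :=
  let cc := booster.foldl (pvInnerA st.1) (0, 0)
  (st.1 + 1,
    if cc.1 > cc.2 then (if val = -1 then st.2 + 1 else st.2)
    else (if val = 1 then st.2 + 1 else st.2))

def errorcalculate (booster : List (Int × Int × Int)) (values : List Int) : Int :=
  (values.foldl (pvStepA booster) (0, 0)).2

-- ===== PORT B =====
-- first loop body of B: accumulate (d0, delta-dict) over booster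
def pvBuildB (st : Int × PySem.Dict Int Int) (e : Int × Int × Int) : Int × PySem.Dict Int Int :=
  if e.2.2 = 1 then
    (if e.2.1 ≥ 0 then
      (st.1 + e.1, st.2.insert (e.2.1 + 1) (st.2.getD (e.2.1 + 1) 0 - 2 * e.1))
     else (st.1 - e.1, st.2))
  else if e.2.2 = -1 then
    (if e.2.1 ≥ 0 then
      (st.1 - e.1, st.2.insert (e.2.1 + 1) (st.2.getD (e.2.1 + 1) 0 + 2 * e.1))
     else (st.1 + e.1, st.2))
  else (st.1 - e.1, st.2)

-- second loop body of B: state is (d, errs), p is (i, val) from enumerate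
def pvStepB (delta : PySem.Dict Int Int) (st : Int × Int) (p : Int × Int) : Int × Int :=
  let d := st.1 + delta.getD p.1 0
  (d, if d > 0 then (if p.2 = -1 then st.2 + 1 else st.2)
      else (if p.2 = 1 then st.2 + 1 else st.2))

def errorcalculate_alt (booster : List (Int × Int × Int)) (values : List Int) : Int :=
  let init := booster.foldl pvBuildB (0, PySem.Dict.empty)
  ((PySem.List.enumerate values).foldl (pvStepB init.2) (init.1, 0)).2

-- ===== PRECONDITION & SPEC =====
def Spec_errorcalculate (booster : List (Int × Int × Int)) (values : List Int) (out : Int) : Prop := out = errorcalculate_alt booster values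
instance (booster : List (Int × Int × Int)) (values : List Int) (out : Int) : Decidable (Spec_errorcalculate booster values out) := by unfold Spec_errorcalculate; infer_instance

-- ===== CLAIM (what is proved, stated in full; the proofs are below) =====
def Claim_equal_errorcalculate : Prop := ∀ (booster : List (Int × Int × Int)) (values : List Int), Dom_errorcalculate booster values → Spec_errorcalculate booster values (errorcalculate booster values)

-- ===== LEMMAS AND PROOFS =====

-- margin contribution of one booster entry at index i (cplus part minus cneg part)
def pvContrib (i : Int) (e : Int × Int × Int) : Int :=
  if e.2.2 = 1 then (if e.2.1 ≥ i then e.1 else -e.1)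
  else if e.2.2 = -1 then (if e.2.1 ≥ i then -e.1 else e.1)
  else -e.1

def pvS (booster : List (Int × Int × Int)) (i : Int) : Int :=
  (booster.map (pvContrib i)).sum

-- margin change of one entry at the moment the index reaches t
def pvFlip (t : Int) (e : Int × Int × Int) : Int :=
  if e.2.2 = 1 ∧ e.2.1 ≥ 0 then (if e.2.1 + 1 = t then -2 * e.1 else 0)
  else if e.2.2 = -1 ∧ e.2.1 ≥ 0 then (if e.2.1 + 1 = t then 2 * e.1 else 0)
  else 0

def pvF (booster : List (Int × Int × Int)) (t : Int) : Int :=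
  (booster.map (pvFlip t)).sum

theorem pvInnerA_sum (booster : List (Int × Int × Int)) (i : Int) :
    ∀ a b : Int, (booster.foldl (pvInnerA i) (a, b)).1 - (booster.foldl (pvInnerA i) (a, b)).2
      = a - b + pvS booster i := by
  induction booster with
  | nil => intro a b; simp [pvS]
  | cons e bs ih =>
    intro a b
    simp only [List.foldl_cons, pvS, List.map_cons, List.sum_cons]
    have h := ih (pvInnerA i (a, b) e).1 (pvInnerA i (a, b) e).2
    simp only [pvS] at h
    rw [h]
    unfold pvInnerA pvContrib
    split_ifs <;> simp_all <;> omega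

theorem pvBuildB_fst (booster : List (Int × Int × Int)) :
    ∀ (d0 : Int) (dict : PySem.Dict Int Int),
      (booster.foldl pvBuildB (d0, dict)).1 = d0 + pvS booster 0 := by
  induction booster with
  | nil => intro d0 dict; simp [pvS]
  | cons e bs ih =>
    intro d0 dict
    simp only [List.foldl_cons, pvS, List.map_cons, List.sum_cons]
    have h := ih (pvBuildB (d0, dict) e).1 (pvBuildB (d0, dict) e).2
    simp only [pvS] at h
    rw [h]
    unfold pvBuildB pvContrib
    split_ifs <;> simp_all <;> omega

theorem pvBuildB_snd (booster : List (Int × Int × Int)) :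
    ∀ (d0 : Int) (dict : PySem.Dict Int Int) (t : Int),
      (booster.foldl pvBuildB (d0, dict)).2.getD t 0 = dict.getD t 0 + pvF booster t := by
  induction booster with
  | nil => intro d0 dict t; simp [pvF]
  | cons e bs ih =>
    intro d0 dict t
    simp only [List.foldl_cons, pvF, List.map_cons, List.sum_cons]
    have h := ih (pvBuildB (d0, dict) e).1 (pvBuildB (d0, dict) e).2 t
    simp only [pvF] at h
    rw [h]
    unfold pvBuildB pvFlip
    split_ifs <;> simp_all [PySem.Dict.getD_insert]
    all_goals omega

theorem pvFlip_step (i : Int) (hi : 0 ≤ i) (e : Int × Int × Int) :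
    pvContrib i e + pvFlip (i + 1) e = pvContrib (i + 1) e := by
  unfold pvContrib pvFlip
  split_ifs <;> simp_all <;> omega

theorem pvS_step (booster : List (Int × Int × Int)) (i : Int) (hi : 0 ≤ i) :
    pvS booster i + pvF booster (i + 1) = pvS booster (i + 1) := by
  induction booster with
  | nil => simp [pvS, pvF]
  | cons e bs ih =>
    simp only [pvS, pvF, List.map_cons, List.sum_cons] at *
    have := pvFlip_step i hi e
    omega

theorem pvFlip_zero (e : Int × Int × Int) : pvFlip 0 e = 0 := by
  unfold pvFlip; split_ifs <;> omega

theorem pvF_zero (booster : List (Int × Int × Int)) : pvF booster 0 = 0 := by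
  induction booster with
  | nil => simp [pvF]
  | cons e bs ih => simp only [pvF, List.map_cons, List.sum_cons, pvFlip_zero] at *; omega

theorem pvLoop_eq (booster : List (Int × Int × Int)) (delta : PySem.Dict Int Int)
    (hd : ∀ t, delta.getD t 0 = pvF booster t) :
    ∀ (vs : List Int) (i d errs : Int), 0 ≤ i → d + pvF booster i = pvS booster i →
      ((PySem.List.enumerate vs i).foldl (pvStepB delta) (d, errs)).2
        = (vs.foldl (pvStepA booster) (i, errs)).2 := by
  intro vs
  induction vs with
  | nil => intro i d errs _ _; simp [PySem.List.enumerate_nil]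
  | cons v vs ih =>
    intro i d errs hi hinv
    rw [PySem.List.enumerate_cons]
    simp only [List.foldl_cons]
    have hstepB : pvStepB delta (d, errs) (i, v)
        = (pvS booster i,
           if pvS booster i > 0 then (if v = -1 then errs + 1 else errs)
           else (if v = 1 then errs + 1 else errs)) := by
      unfold pvStepB
      simp only [hd i]
      rw [show d + pvF booster i = pvS booster i from hinv]
    have hstepA : pvStepA booster (i, errs) v
        = (i + 1,
           if pvS booster i > 0 then (if v = -1 then errs + 1 else errs)
           else (if v = 1 then errs + 1 else errs)) := by
      unfold pvStepA
      have hcc := pvInnerA_sum booster i 0 0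
      by_cases hpos : pvS booster i > 0
      · have : (booster.foldl (pvInnerA i) (0, 0)).1 > (booster.foldl (pvInnerA i) (0, 0)).2 := by omega
        simp [this, hpos]
      · have : ¬ (booster.foldl (pvInnerA i) (0, 0)).1 > (booster.foldl (pvInnerA i) (0, 0)).2 := by omega
        simp [this, hpos]
    rw [hstepB, hstepA]
    exact ih (i + 1) (pvS booster i)
      (if pvS booster i > 0 then (if v = -1 then errs + 1 else errs)
       else (if v = 1 then errs + 1 else errs))
      (by omega) (pvS_step booster i hi)

-- ===== VERDICT (by name: the statement is the Claim_ definition above) =====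
theorem errorcalculate_spec : Claim_equal_errorcalculate := by
  intro booster values _
  unfold Spec_errorcalculate errorcalculate errorcalculate_alt
  have hfst := pvBuildB_fst booster 0 PySem.Dict.empty
  have hsnd : ∀ t, (booster.foldl pvBuildB (0, PySem.Dict.empty)).2.getD t 0 = pvF booster t := by
    intro t
    rw [pvBuildB_snd booster 0 PySem.Dict.empty t]
    simp [PySem.Dict.getD, PySem.Dict.empty, PySem.Dict.get?]
  rw [pvLoop_eq booster _ hsnd values 0 _ 0 le_rfl (by rw [hfst, pvF_zero]; ring)]
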